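-- pv_equiv track=rewrite | github.com/eipp/maily | apps/api/ai/adapters/openai_adapter.py | _categorize_models
-- ===== SOURCE A (Python) =====
-- from typing import Dict, List, Optional, Any, Union, AsyncIterator
--
-- def _categorize_models(model_ids: List[str]) -> Dict[str, List[str]]:
--     """
--     Categorize models by type.
--
--     Args:
--         model_ids: List of model IDs
--
--     Returns:
--         Dictionary of model categories with corresponding model IDs
--     """
--     categories = {
--         "gpt4": [],
--         "gpt35": [],
--         "embeddings": [],
--         "dall-e": [],
--         "whisper": [],
--         "other": []
--     }
--
--     for model_id in model_ids:
--         if model_id.startswith("gpt-4"):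
--             categories["gpt4"].append(model_id)
--         elif model_id.startswith("gpt-3.5"):
--             categories["gpt35"].append(model_id)
--         elif "embedding" in model_id:
--             categories["embeddings"].append(model_id)
--         elif model_id.startswith("dall-e"):
--             categories["dall-e"].append(model_id)
--         elif model_id.startswith("whisper"):
--             categories["whisper"].append(model_id)
--         else:
--             categories["other"].append(model_id)
--
--     return categories
-- ===== SOURCE B (Python) =====
-- def _categorize_models(model_ids):
--     """Categorize models by type (per-category filter passes over a classifier)."""
--     def _category(m):
--         if m.startswith("gpt-4"):
--             return "gpt4"
--         if m.startswith("gpt-3.5"):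
--             return "gpt35"
--         if "embedding" in m:
--             return "embeddings"
--         if m.startswith("dall-e"):
--             return "dall-e"
--         if m.startswith("whisper"):
--             return "whisper"
--         return "other"
--     return {c: [m for m in model_ids if _category(m) == c]
--             for c in ("gpt4", "gpt35", "embeddings", "dall-e", "whisper", "other")}
-- ===== Notes on version B (the rewrite author's own statement) =====
-- stated objective: idiomatic
-- what changed: Replaces the single pass that mutates six pre-built dict lists with a classifier function plus a dict comprehension that builds each category list by a filter pass over the input.
import Mathlib
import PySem

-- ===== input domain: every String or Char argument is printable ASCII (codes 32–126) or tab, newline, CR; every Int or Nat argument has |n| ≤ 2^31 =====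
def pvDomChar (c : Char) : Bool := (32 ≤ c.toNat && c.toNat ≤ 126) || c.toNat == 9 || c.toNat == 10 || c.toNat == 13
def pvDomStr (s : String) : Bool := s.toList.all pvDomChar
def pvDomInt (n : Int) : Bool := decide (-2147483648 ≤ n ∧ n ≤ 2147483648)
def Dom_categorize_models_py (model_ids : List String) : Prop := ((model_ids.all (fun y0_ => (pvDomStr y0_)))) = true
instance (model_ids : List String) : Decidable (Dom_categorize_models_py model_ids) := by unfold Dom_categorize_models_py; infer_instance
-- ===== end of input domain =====

-- B replaces A's single mutating pass over a pre-built dict with a classifier plus one filter pass per category (idiomatic decomposition; same cost).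

-- ===== PORT A =====
def categorize_models_py (model_ids : List String) : List (String × List String) :=
  let init : PySem.Dict String (List String) :=
    PySem.Dict.ofList [("gpt4", []), ("gpt35", []), ("embeddings", []),
                       ("dall-e", []), ("whisper", []), ("other", [])]
  let d := model_ids.foldl (fun cats m =>
    if PySem.Str.startswith m "gpt-4" then cats.modify "gpt4" [] (· ++ [m])
    else if PySem.Str.startswith m "gpt-3.5" then cats.modify "gpt35" [] (· ++ [m])
    else if PySem.Str.isIn "embedding" m then cats.modify "embeddings" [] (· ++ [m])
    else if PySem.Str.startswith m "dall-e" then cats.modify "dall-e" [] (· ++ [m])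
    else if PySem.Str.startswith m "whisper" then cats.modify "whisper" [] (· ++ [m])
    else cats.modify "other" [] (· ++ [m])) init
  d.items

-- ===== PORT B =====
def pvCategory (m : String) : String :=
  if PySem.Str.startswith m "gpt-4" then "gpt4"
  else if PySem.Str.startswith m "gpt-3.5" then "gpt35"
  else if PySem.Str.isIn "embedding" m then "embeddings"
  else if PySem.Str.startswith m "dall-e" then "dall-e"
  else if PySem.Str.startswith m "whisper" then "whisper"
  else "other"

def categorize_models_py_alt (model_ids : List String) : List (String × List String) :=
  ["gpt4", "gpt35", "embeddings", "dall-e", "whisper", "other"].map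
    (fun c => (c, model_ids.filter (fun m => pvCategory m == c)))

-- ===== PRECONDITION & SPEC =====
def Spec_categorize_models_py (model_ids : List String) (out : List (String × List String)) : Prop := out = categorize_models_py_alt model_ids
instance (model_ids : List String) (out : List (String × List String)) : Decidable (Spec_categorize_models_py model_ids out) := by unfold Spec_categorize_models_py; infer_instance

-- ===== CLAIM (what is proved, stated in full; the proofs are below) =====
def Claim_equal_categorize_models_py : Prop := ∀ (model_ids : List String), Dom_categorize_models_py model_ids → Spec_categorize_models_py model_ids (categorize_models_py model_ids)

-- ===== LEMMAS AND PROOFS =====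

-- loop invariant: after folding xs, each category's dict entry is exactly the filter of xs by the classifier
theorem pv_loop_eq (xs : List String) :
    xs.foldl (fun cats m =>
      if PySem.Str.startswith m "gpt-4" then cats.modify "gpt4" [] (· ++ [m])
      else if PySem.Str.startswith m "gpt-3.5" then cats.modify "gpt35" [] (· ++ [m])
      else if PySem.Str.isIn "embedding" m then cats.modify "embeddings" [] (· ++ [m])
      else if PySem.Str.startswith m "dall-e" then cats.modify "dall-e" [] (· ++ [m])
      else if PySem.Str.startswith m "whisper" then cats.modify "whisper" [] (· ++ [m])
      else cats.modify "other" [] (· ++ [m]))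
      (PySem.Dict.ofList [("gpt4", []), ("gpt35", []), ("embeddings", []),
                          ("dall-e", []), ("whisper", []), ("other", [])])
    = PySem.Dict.mk
        [("gpt4", xs.filter (fun m => pvCategory m == "gpt4")),
         ("gpt35", xs.filter (fun m => pvCategory m == "gpt35")),
         ("embeddings", xs.filter (fun m => pvCategory m == "embeddings")),
         ("dall-e", xs.filter (fun m => pvCategory m == "dall-e")),
         ("whisper", xs.filter (fun m => pvCategory m == "whisper")),
         ("other", xs.filter (fun m => pvCategory m == "other"))] := by
  induction xs using List.reverseRecOn with
  | nil => decide
  | append_singleton xs m ih =>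
      rw [List.foldl_append, ih]
      simp only [List.foldl_cons, List.foldl_nil]
      split_ifs with h1 h2 h3 h4 h5
      · have hc : pvCategory m = "gpt4" := by unfold pvCategory; rw [if_pos h1]
        simp [PySem.Dict.modify, PySem.Dict.insert, PySem.Dict.getD, PySem.Dict.get?,
          PySem.Dict.contains, List.filter_append, hc]
      · have hc : pvCategory m = "gpt35" := by unfold pvCategory; rw [if_neg h1, if_pos h2]
        simp [PySem.Dict.modify, PySem.Dict.insert, PySem.Dict.getD, PySem.Dict.get?,
          PySem.Dict.contains, List.filter_append, hc]
      · have hc : pvCategory m = "embeddings" := by unfold pvCategory; rw [if_neg h1, if_neg h2, if_pos h3]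
        simp [PySem.Dict.modify, PySem.Dict.insert, PySem.Dict.getD, PySem.Dict.get?,
          PySem.Dict.contains, List.filter_append, hc]
      · have hc : pvCategory m = "dall-e" := by unfold pvCategory; rw [if_neg h1, if_neg h2, if_neg h3, if_pos h4]
        simp [PySem.Dict.modify, PySem.Dict.insert, PySem.Dict.getD, PySem.Dict.get?,
          PySem.Dict.contains, List.filter_append, hc]
      · have hc : pvCategory m = "whisper" := by unfold pvCategory; rw [if_neg h1, if_neg h2, if_neg h3, if_neg h4, if_pos h5]
        simp [PySem.Dict.modify, PySem.Dict.insert, PySem.Dict.getD, PySem.Dict.get?,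
          PySem.Dict.contains, List.filter_append, hc]
      · have hc : pvCategory m = "other" := by unfold pvCategory; rw [if_neg h1, if_neg h2, if_neg h3, if_neg h4, if_neg h5]
        simp [PySem.Dict.modify, PySem.Dict.insert, PySem.Dict.getD, PySem.Dict.get?,
          PySem.Dict.contains, List.filter_append, hc]

-- ===== VERDICT (by name: the statement is the Claim_ definition above) =====
theorem categorize_models_py_spec : Claim_equal_categorize_models_py := by
  intro model_ids _
  unfold Spec_categorize_models_py categorize_models_py categorize_models_py_alt
  simp only [pv_loop_eq, List.map]
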